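-- pv_equiv track=rewrite | github.com/divancontreras/SSHQueuer | main.py | bashify
-- ===== SOURCE A (Python) =====
-- def bashify(filepath):
--     filepath = filepath.split("/")
--     newfilepath = ""
--     for i in range(len(filepath) - 1, -1, -1):
--         if i == len(filepath) - 1:
--             newfilepath = f"/{filepath[i]}"
--         elif filepath[i].count(".") == 3:
--             return newfilepath
--         else:
--             newfilepath = f"/{filepath[i]}" + newfilepath
-- ===== SOURCE B (Python) =====
-- def bashify(filepath):
--     parts = filepath.split("/")
--     ip_idx = [i for i in range(len(parts) - 1) if parts[i].count(".") == 3]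
--     if not ip_idx:
--         return None
--     return "/" + "/".join(parts[ip_idx[-1] + 1:])
-- ===== Notes on version B (the rewrite author's own statement) =====
-- stated objective: alternative
-- what changed: A builds the result in a single backward loop that prepends slash+component and early-returns when it hits an IP-like (three-dot) component; B instead does a forward scan collecting the indices of IP-like components (excluding the last one), takes the rightmost such index, and constructs the result in one shot by joining the tail slice with slash separators.
import Mathlib
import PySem

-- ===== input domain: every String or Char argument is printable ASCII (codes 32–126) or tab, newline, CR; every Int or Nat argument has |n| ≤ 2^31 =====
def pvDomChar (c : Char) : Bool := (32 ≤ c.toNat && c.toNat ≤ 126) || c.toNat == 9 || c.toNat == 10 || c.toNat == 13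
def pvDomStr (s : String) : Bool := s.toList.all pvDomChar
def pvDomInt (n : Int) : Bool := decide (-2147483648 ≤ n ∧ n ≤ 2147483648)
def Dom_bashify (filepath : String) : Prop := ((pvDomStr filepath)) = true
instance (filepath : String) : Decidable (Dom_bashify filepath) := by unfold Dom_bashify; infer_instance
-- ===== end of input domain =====

-- B replaces A's backward early-stopping prepend loop by a forward index scan for the
-- rightmost IP-like component followed by a slice-and-join (objective: alternative decomposition).

-- ===== PORT A =====
-- backward loop `for i in range(len(parts)-1, -1, -1)`; fuel n means current index is n-1;
-- falling off the loop returns Python's implicit None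
def bashifyGo (parts : List String) : Nat → String → Option String
  | 0, _ => none
  | i+1, acc =>
    if i == parts.length - 1 then
      bashifyGo parts i ("/" ++ parts.getD i "")
    else if PySem.Str.count (parts.getD i "") "." == 3 then
      some acc
    else
      bashifyGo parts i ("/" ++ parts.getD i "" ++ acc)

def bashify (filepath : String) : Option String :=
  let parts := (PySem.Str.split? filepath "/").getD []
  bashifyGo parts parts.length ""

-- ===== PORT B =====
def bashify_alt (filepath : String) : Option String :=
  let parts := (PySem.Str.split? filepath "/").getD []
  let ipIdx := (List.range (parts.length - 1)).filter
      (fun i => PySem.Str.count (parts.getD i "") "." == 3)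
  match ipIdx.getLast? with
  | none => none
  | some j => some ("/" ++ PySem.Str.join "/" (parts.drop (j+1)))

-- ===== PRECONDITION & SPEC =====
def Spec_bashify (filepath : String) (out : Option String) : Prop := out = bashify_alt filepath
instance (filepath : String) (out : Option String) : Decidable (Spec_bashify filepath out) := by unfold Spec_bashify; infer_instance

-- ===== CLAIM (what is proved, stated in full; the proofs are below) =====
def Claim_equal_bashify : Prop := ∀ (filepath : String), Dom_bashify filepath → Spec_bashify filepath (bashify filepath)

-- ===== LEMMAS AND PROOFS =====

-- B's body as a function of the split components (definitionally bashify_alt's body)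
def altBody (parts : List String) : Option String :=
  match ((List.range (parts.length - 1)).filter
      (fun i => PySem.Str.count (parts.getD i "") "." == 3)).getLast? with
  | none => none
  | some j => some ("/" ++ PySem.Str.join "/" (parts.drop (j+1)))

-- concatenation of "/"-prefixed components, as A's loop builds it
def catS (l : List String) : String := l.foldr (fun s acc => "/" ++ s ++ acc) ""

theorem catS_append (l l' : List String) : catS (l ++ l') = catS l ++ catS l' := by
  induction l with
  | nil => simp [catS, String.empty_append]
  | cons x xs ih =>
      simp only [List.cons_append, catS, List.foldr_cons] at ih ⊢
      rw [ih, ← String.append_assoc]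

theorem catS_eq_join (l : List String) (h : l ≠ []) :
    catS l = "/" ++ PySem.Str.join "/" l := by
  induction l with
  | nil => exact absurd rfl h
  | cons x xs ih =>
      cases xs with
      | nil =>
          apply String.toList_inj.mp
          simp [catS, PySem.Str.toList_join, PySem.Chars.join_singleton]
      | cons y ys =>
          apply String.toList_inj.mp
          have := congrArg String.toList (ih (by simp))
          simp only [String.toList_append] at this ⊢
          simp only [catS, List.foldr_cons] at this ⊢
          simp [PySem.Str.toList_join, PySem.Chars.join_cons_cons] at this ⊢
          simp [this]

-- splitting off the last component
theorem drop_take_last (parts : List String) (j : Nat) (hj : j + 1 < parts.length) :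
    parts.drop (j+1) =
      (parts.take (parts.length - 1)).drop (j+1) ++ [parts.getD (parts.length - 1) ""] := by
  have h1 : parts.length - 1 < parts.length := by omega
  have h2 : parts.drop (parts.length - 1) = [parts.getD (parts.length - 1) ""] := by
    apply List.ext_getElem
    · simp; omega
    · intro k hk1 hk2
      simp only [List.length_drop] at hk1
      have hk0 : k = 0 := by omega
      subst hk0
      simp [List.getD, List.getElem?_eq_getElem h1]
  conv_lhs => rw [← List.take_append_drop (parts.length - 1) parts]
  rw [List.drop_append_of_le_length (by rw [List.length_take]; omega), h2]

-- the value A's loop has built when it stops at index j equals B's slice-and-join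
theorem catS_take_eq_join (parts : List String) (j : Nat) (hj : j + 1 < parts.length) :
    catS ((parts.take (parts.length - 1)).drop (j+1)) ++
        ("/" ++ parts.getD (parts.length - 1) "") =
      "/" ++ PySem.Str.join "/" (parts.drop (j+1)) := by
  have hd := drop_take_last parts j hj
  have hne : parts.drop (j+1) ≠ [] := by
    intro hnil
    have := congrArg List.length hnil
    simp at this
    omega
  rw [← catS_eq_join _ hne, hd, catS_append]
  congr 1
  simp [catS, String.append_empty]

-- invariant of A's loop below the first (index len-1) iteration
theorem bashifyGo_low (parts : List String) (i : Nat) (acc : String)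
    (hi : i < parts.length - 1) :
    bashifyGo parts (i+1) acc =
      (((List.range (i+1)).filter
          (fun k => PySem.Str.count (parts.getD k "") "." == 3)).getLast?).map
        (fun j => catS ((parts.take (i+1)).drop (j+1)) ++ acc) := by
  induction i generalizing acc with
  | zero =>
      have hne : (0 == parts.length - 1) = false := by
        simp only [beq_eq_false_iff_ne]; omega
      rw [bashifyGo, hne]
      simp only [Bool.false_eq_true, if_false]
      by_cases hp : (PySem.Str.count (parts.getD 0 "") "." == 3) = true
      · have hp' : PySem.Chars.count ((parts[0]?.getD "")).toList ['.'] = 3 := by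
          simpa [List.getD] using hp
        rw [if_pos hp]
        simp [List.range_succ, hp', catS, String.empty_append]
      · have hp' : ¬ PySem.Chars.count ((parts[0]?.getD "")).toList ['.'] = 3 := by
          simpa [List.getD] using hp
        rw [if_neg (by simpa [List.getD] using hp')]
        rw [bashifyGo]
        simp [List.range_succ, hp']
  | succ i ih =>
      have hne : (i + 1 == parts.length - 1) = false := by
        simp only [beq_eq_false_iff_ne]; omega
      rw [bashifyGo, hne]
      simp only [Bool.false_eq_true, if_false]
      have htake : parts.take (i+2) = parts.take (i+1) ++ [parts.getD (i+1) ""] := by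
        have h1 : i + 1 < parts.length := by omega
        rw [List.take_add_one]
        simp [List.getD, List.getElem?_eq_getElem h1]
      by_cases hp : (PySem.Str.count (parts.getD (i+1) "") "." == 3) = true
      · have hp' : PySem.Chars.count ((parts[i+1]?.getD "")).toList ['.'] = 3 := by
          simpa [List.getD] using hp
        rw [if_pos hp]
        have hdrop : List.drop (i+1+1) (List.take (i+1) parts ++ [parts[i+1]?.getD ""]) = [] :=
          List.drop_eq_nil_of_le (by simp [List.length_take])
        simp [List.range_succ, List.filter_append, hp', htake, hdrop, catS,
          String.empty_append]
      · have hp' : ¬ PySem.Chars.count ((parts[i+1]?.getD "")).toList ['.'] = 3 := by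
          simpa [List.getD] using hp
        rw [if_neg (by simpa [List.getD] using hp')]
        rw [ih _ (by omega)]
        have hfil : (List.range (i+1+1)).filter
            (fun k => PySem.Str.count (parts.getD k "") "." == 3) =
            (List.range (i+1)).filter
            (fun k => PySem.Str.count (parts.getD k "") "." == 3) := by
          simp [List.range_succ, List.filter_append, hp', List.filter_cons]
        rw [hfil]
        cases hlast : ((List.range (i+1)).filter
            (fun k => PySem.Str.count (parts.getD k "") "." == 3)).getLast? with
        | none => simp
        | some j =>
            have hj : j < i + 1 :=
              List.mem_range.mp (List.mem_filter.mp (List.mem_of_getLast? hlast)).1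
            simp only [Option.map_some]
            rw [htake]
            rw [List.drop_append_of_le_length (by rw [List.length_take]; omega)]
            rw [catS_append]
            simp [catS, String.append_empty, String.append_assoc]

theorem go_eq_altBody (parts : List String) :
    bashifyGo parts parts.length "" = altBody parts := by
  cases hparts : parts with
  | nil => simp [bashifyGo, altBody]
  | cons p0 ps =>
      subst hparts
      show bashifyGo (p0 :: ps) (ps.length + 1) "" = _
      rw [bashifyGo]
      have h1 : (ps.length == (p0 :: ps).length - 1) = true := by simp
      rw [h1]
      simp only [if_true]
      cases hps : ps with
      | nil =>
          subst hps
          show bashifyGo [p0] 0 _ = _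
          rw [bashifyGo]
          simp [altBody]
      | cons q qs =>
          subst hps
          rw [show (q :: qs).length = qs.length + 1 from rfl]
          rw [bashifyGo_low _ qs.length _ (by simp)]
          unfold altBody
          rw [show (p0 :: q :: qs).length - 1 = qs.length + 1 from rfl]
          cases hlast : ((List.range (qs.length + 1)).filter
              (fun k => PySem.Str.count ((p0 :: q :: qs).getD k "") "." == 3)).getLast? with
          | none => rfl
          | some j =>
              have hj : j < qs.length + 1 :=
                List.mem_range.mp (List.mem_filter.mp (List.mem_of_getLast? hlast)).1
              simp only [Option.map_some]
              congr 1
              have := catS_take_eq_join (p0 :: q :: qs) j (by simp; omega)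
              rw [show (p0 :: q :: qs).length - 1 = qs.length + 1 from rfl] at this
              rw [← String.append_assoc] at this
              rw [← this]
              rw [String.append_assoc]

-- ===== VERDICT (by name: the statement is the Claim_ definition above) =====
theorem bashify_spec : Claim_equal_bashify := by
  intro filepath _
  unfold Spec_bashify
  show bashifyGo _ _ "" = bashify_alt filepath
  have h : bashify_alt filepath = altBody ((PySem.Str.split? filepath "/").getD []) := rfl
  rw [h]
  exact go_eq_altBody _
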